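-- pv_equiv track=rewrite | github.com/KoziKim/Algorithm-practice | 프로그래머스/lv1/42840. 모의고사/모의고사.py | solution
-- ===== SOURCE A (Python) =====
-- def solution(answers):
--     cnt1 = 0
--     cnt2 = 0
--     cnt3 = 0
--     for i in range(len(answers)):
--         if i%10 == 0 and answers[i] == 3:
--             cnt3 += 1
--         if i%10 == 1 and answers[i] == 3:
--             cnt3 += 1
--         if i%10 == 2 and answers[i] == 1:
--             cnt3 += 1
--         if i%10 == 3 and answers[i] == 1:
--             cnt3 += 1
--         if i%10 == 4 and answers[i] == 2:
--             cnt3 += 1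
--         if i%10 == 5 and answers[i] == 2:
--             cnt3 += 1
--         if i%10 == 6 and answers[i] == 4:
--             cnt3 += 1
--         if i%10 == 7 and answers[i] == 4:
--             cnt3 += 1
--         if i%10 == 8 and answers[i] == 5:
--             cnt3 += 1
--         if i%10 == 9 and answers[i] == 5:
--             cnt3 += 1
--
--         if i%2 == 0 and answers[i] == 2:
--             cnt2 += 1
--         if i%8 == 1 and answers[i] == 1:
--             cnt2 += 1
--         if i%8 == 3 and answers[i] == 3:
--             cnt2 += 1
--         if i%8 == 5 and answers[i] == 4:
--             cnt2 += 1
--         if i%8 == 7 and answers[i] == 5: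
--             cnt2 += 1
--
--         if i%5 == 0 and answers[i] == 1:
--             cnt1 += 1
--         if i%5 == 1 and answers[i] == 2:
--             cnt1 += 1
--         if i%5 == 2 and answers[i] == 3:
--             cnt1 += 1
--         if i%5 == 3 and answers[i] == 4:
--             cnt1 += 1
--         if i%5 == 4 and answers[i] == 5:
--             cnt1 += 1
--     max_cnt = max(cnt1, cnt2, cnt3)
--
--     s = [(cnt1, 1), (cnt2, 2), (cnt3, 3)]
--     answer = []
--     for i in range(len(s)):
--         if s[i][0] == max_cnt:
--             answer.append(s[i][1])
--
--     return answer
-- ===== SOURCE B (Python) =====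
-- def solution(answers):
--     # Histogram approach: one pass buckets the answers by residue class mod 40
--     # (40 = lcm of the three pattern periods) into a dict keyed by (i % 40, value);
--     # each supposer's score is then read off the histogram at the 40 residues,
--     # without ever comparing answers against patterns element by element.
--     keys = [(i % 40, a) for i, a in enumerate(answers)]
--     freq = {}
--     for k in keys:
--         freq[k] = freq.get(k, 0) + 1
--     patterns = ([1, 2, 3, 4, 5],
--                 [2, 1, 2, 3, 2, 4, 2, 5],
--                 [3, 3, 1, 1, 2, 2, 4, 4, 5, 5])
--     counts = [sum(freq.get((r, p[r % len(p)]), 0) for r in range(40)) for p in patterns]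
--     m = max(counts)
--     return [k + 1 for k in range(3) if counts[k] == m]
-- ===== Notes on version B (the rewrite author's own statement) =====
-- stated objective: alternative
-- what changed: Replaces per-index pattern comparison by a residue-class histogram: one pass buckets answers into a dict keyed by (i % 40, value) (40 = lcm of the pattern periods), each score is then a 40-term sum of dict lookups against the patterns, and the result is built from range(3).
import Mathlib
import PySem

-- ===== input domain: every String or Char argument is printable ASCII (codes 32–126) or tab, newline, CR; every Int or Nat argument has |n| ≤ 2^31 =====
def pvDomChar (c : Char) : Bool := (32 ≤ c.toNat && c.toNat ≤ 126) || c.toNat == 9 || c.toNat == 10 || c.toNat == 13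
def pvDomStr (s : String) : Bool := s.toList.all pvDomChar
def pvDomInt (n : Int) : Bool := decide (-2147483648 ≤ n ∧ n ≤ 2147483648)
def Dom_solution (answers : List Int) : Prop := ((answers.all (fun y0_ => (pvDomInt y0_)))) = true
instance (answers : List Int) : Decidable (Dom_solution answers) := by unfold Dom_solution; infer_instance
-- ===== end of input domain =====

-- B replaces A's per-index 20-branch residue comparison by a residue-class
-- histogram: one pass buckets answers into a dict keyed by (i % 40, value),
-- scores are 40-term sums of dict lookups against the patterns; same O(n) cost.


-- ===== PORT A =====
-- step of A's single loop: the 20 sequential residue tests, state (cnt1, cnt2, cnt3)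
def aStep (answers : List Int) (c : Int × Int × Int) (i : Int) : Int × Int × Int :=
  let a := PySem.List.pyGetD answers i 0
  let cnt1 := c.1
  let cnt2 := c.2.1
  let cnt3 := c.2.2
  let cnt3 := if PySem.Int.mod i 10 = 0 ∧ a = 3 then cnt3 + 1 else cnt3
  let cnt3 := if PySem.Int.mod i 10 = 1 ∧ a = 3 then cnt3 + 1 else cnt3
  let cnt3 := if PySem.Int.mod i 10 = 2 ∧ a = 1 then cnt3 + 1 else cnt3
  let cnt3 := if PySem.Int.mod i 10 = 3 ∧ a = 1 then cnt3 + 1 else cnt3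
  let cnt3 := if PySem.Int.mod i 10 = 4 ∧ a = 2 then cnt3 + 1 else cnt3
  let cnt3 := if PySem.Int.mod i 10 = 5 ∧ a = 2 then cnt3 + 1 else cnt3
  let cnt3 := if PySem.Int.mod i 10 = 6 ∧ a = 4 then cnt3 + 1 else cnt3
  let cnt3 := if PySem.Int.mod i 10 = 7 ∧ a = 4 then cnt3 + 1 else cnt3
  let cnt3 := if PySem.Int.mod i 10 = 8 ∧ a = 5 then cnt3 + 1 else cnt3
  let cnt3 := if PySem.Int.mod i 10 = 9 ∧ a = 5 then cnt3 + 1 else cnt3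
  let cnt2 := if PySem.Int.mod i 2 = 0 ∧ a = 2 then cnt2 + 1 else cnt2
  let cnt2 := if PySem.Int.mod i 8 = 1 ∧ a = 1 then cnt2 + 1 else cnt2
  let cnt2 := if PySem.Int.mod i 8 = 3 ∧ a = 3 then cnt2 + 1 else cnt2
  let cnt2 := if PySem.Int.mod i 8 = 5 ∧ a = 4 then cnt2 + 1 else cnt2
  let cnt2 := if PySem.Int.mod i 8 = 7 ∧ a = 5 then cnt2 + 1 else cnt2
  let cnt1 := if PySem.Int.mod i 5 = 0 ∧ a = 1 then cnt1 + 1 else cnt1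
  let cnt1 := if PySem.Int.mod i 5 = 1 ∧ a = 2 then cnt1 + 1 else cnt1
  let cnt1 := if PySem.Int.mod i 5 = 2 ∧ a = 3 then cnt1 + 1 else cnt1
  let cnt1 := if PySem.Int.mod i 5 = 3 ∧ a = 4 then cnt1 + 1 else cnt1
  let cnt1 := if PySem.Int.mod i 5 = 4 ∧ a = 5 then cnt1 + 1 else cnt1
  (cnt1, cnt2, cnt3)

def solution (answers : List Int) : List Int :=
  let r := (PySem.List.pyRange 0 (answers.length : Int) 1).foldl (aStep answers) (0, 0, 0)
  let maxCnt := max r.1 (max r.2.1 r.2.2)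
  let s : List (Int × Int) := [(r.1, 1), (r.2.1, 2), (r.2.2, 3)]
  (PySem.List.pyRange 0 (s.length : Int) 1).foldl
    (fun answer i =>
      let t := PySem.List.pyGetD s i (0, 0)
      if t.1 = maxCnt then answer ++ [t.2] else answer) []

-- ===== PORT B =====
def pat1 : List Int := [1, 2, 3, 4, 5]
def pat2 : List Int := [2, 1, 2, 3, 2, 4, 2, 5]
def pat3 : List Int := [3, 3, 1, 1, 2, 2, 4, 4, 5, 5]

-- keys = [(i % 40, a) for i, a in enumerate(answers)]
def histKeys (answers : List Int) : List (Int × Int) :=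
  (PySem.List.enumerate answers 0).map (fun ia => (PySem.Int.mod ia.1 40, ia.2))

-- for k in keys: freq[k] = freq.get(k, 0) + 1
def histFreq (answers : List Int) : PySem.Dict (Int × Int) Int :=
  (histKeys answers).foldl (fun d k => d.insert k (d.getD k 0 + 1)) PySem.Dict.empty

-- sum(freq.get((r, p[r % len(p)]), 0) for r in range(40))
def cntHist (freq : PySem.Dict (Int × Int) Int) (p : List Int) : Int :=
  (PySem.List.pyRange 0 40 1).foldl
    (fun s r =>
      s + freq.getD (r, PySem.List.pyGetD p (PySem.Int.mod r (p.length : Int)) 0) 0) 0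

def solution_alt (answers : List Int) : List Int :=
  let freq := histFreq answers
  let counts := [pat1, pat2, pat3].map (cntHist freq)
  let m := (PySem.List.max? counts (fun y => y)).getD 0
  (PySem.List.pyRange 0 3 1).foldl
    (fun acc k => if PySem.List.pyGetD counts k 0 = m then acc ++ [k + 1] else acc) []

-- ===== PRECONDITION & SPEC =====
def Spec_solution (answers : List Int) (out : List Int) : Prop := out = solution_alt answers
instance (answers : List Int) (out : List Int) : Decidable (Spec_solution answers out) := by unfold Spec_solution; infer_instance

-- ===== CLAIM (what is proved, stated in full; the proofs are below) =====
def Claim_equal_solution : Prop := ∀ (answers : List Int), Dom_solution answers → Spec_solution answers (solution answers)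

-- ===== LEMMAS AND PROOFS =====

-- B's per-index indicator step, for pattern p (the common reference form)
def bStep (answers p : List Int) (c i : Int) : Int :=
  if PySem.List.pyGetD answers i 0 = PySem.List.pyGetD p (PySem.Int.mod i (p.length : Int)) 0 then c + 1 else c

lemma aStep_comp (answers : List Int) (c1 c2 c3 : Int) (k : Nat) :
    aStep answers (c1, c2, c3) (k : Int) =
      (bStep answers pat1 c1 k, bStep answers pat2 c2 k, bStep answers pat3 c3 k) := by
  simp only [aStep, bStep, pat1, pat2, pat3, List.length_cons, List.length_nil,
    Nat.ofNat_pos, PySem.Int.mod_eq_emod_of_pos]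
  refine Prod.ext ?_ (Prod.ext ?_ ?_)
  · have : k % 5 = 0 ∨ k % 5 = 1 ∨ k % 5 = 2 ∨ k % 5 = 3 ∨ k % 5 = 4 := by omega
    rcases this with h | h | h | h | h <;>
      simp [show ((k : Int) % 5) = ((k % 5 : Nat) : Int) from by omega, h,
        PySem.List.pyGetD_natCast, PySem.List.pyGetD_ofNat']
  · have : k % 8 = 0 ∨ k % 8 = 1 ∨ k % 8 = 2 ∨ k % 8 = 3 ∨ k % 8 = 4 ∨ k % 8 = 5 ∨
        k % 8 = 6 ∨ k % 8 = 7 := by omega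
    rcases this with h | h | h | h | h | h | h | h <;>
      simp [show ((k : Int) % 8) = ((k % 8 : Nat) : Int) from by omega,
        show ((k : Int) % 2) = ((k % 8 % 2 : Nat) : Int) from by omega, h,
        PySem.List.pyGetD_natCast, PySem.List.pyGetD_ofNat']
  · have : k % 10 = 0 ∨ k % 10 = 1 ∨ k % 10 = 2 ∨ k % 10 = 3 ∨ k % 10 = 4 ∨ k % 10 = 5 ∨
        k % 10 = 6 ∨ k % 10 = 7 ∨ k % 10 = 8 ∨ k % 10 = 9 := by omega
    rcases this with h | h | h | h | h | h | h | h | h | h <;>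
      simp [show ((k : Int) % 10) = ((k % 10 : Nat) : Int) from by omega, h,
        PySem.List.pyGetD_natCast, PySem.List.pyGetD_ofNat']

lemma foldl_triple (answers : List Int) (L : List Int) (hL : ∀ i ∈ L, 0 ≤ i) :
    ∀ c1 c2 c3 : Int,
      L.foldl (aStep answers) (c1, c2, c3) =
        (L.foldl (bStep answers pat1) c1,
         L.foldl (bStep answers pat2) c2,
         L.foldl (bStep answers pat3) c3) := by
  induction L with
  | nil => intro c1 c2 c3; rfl
  | cons i t ih =>
    intro c1 c2 c3
    have hi : 0 ≤ i := hL i (List.mem_cons_self ..)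
    obtain ⟨k, rfl⟩ : ∃ k : Nat, i = (k : Int) := ⟨i.toNat, (Int.toNat_of_nonneg hi).symm⟩
    simp only [List.foldl_cons, aStep_comp]
    exact ih (fun j hj => hL j (List.mem_cons_of_mem _ hj)) _ _ _

-- the bStep fold counts the matches, as a countP over enumerate
lemma bStep_fold_eq_countP (answers p : List Int) :
    (PySem.List.pyRange 0 (answers.length : Int) 1).foldl (bStep answers p) 0 =
      ((PySem.List.enumerate answers 0).countP
        (fun ia => ia.2 == PySem.List.pyGetD p (PySem.Int.mod ia.1 (p.length : Int)) 0) : Int) := by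
  unfold bStep
  rw [PySem.List.enumerate_eq_map_pyRange (d := 0), List.countP_map]
  have h := PySem.List.foldl_count_if
    (fun j => PySem.List.pyGetD answers j 0 == PySem.List.pyGetD p (PySem.Int.mod j (p.length : Int)) 0)
    (PySem.List.pyRange 0 (answers.length : Int) 1) 0
  simp only [beq_iff_eq, zero_add] at h
  rw [h]
  norm_num [Function.comp_def]

-- the 0/1-sum of one key over the 40 residues: 1 exactly when the pair matches its pattern
lemma count_one_key (col : Int → Int) (k1 k2 : Int) (h0 : 0 ≤ k1) (h40 : k1 < 40) :
    ((PySem.List.pyRange 0 40 1).map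
        (fun r => if ((r, col r) : Int × Int) == (k1, k2) then (1 : Int) else 0)).sum =
      if k2 = col k1 then 1 else 0 := by
  rw [PySem.List.sum_map_ite_one_zero]
  obtain ⟨m, rfl⟩ : ∃ m : Nat, k1 = (m : Int) := ⟨k1.toNat, (Int.toNat_of_nonneg h0).symm⟩
  have hm : m < 40 := by exact_mod_cast h40
  by_cases hc : k2 = col (m : Int)
  · have hcp : (PySem.List.pyRange 0 40 1).countP
        (fun r => ((r, col r) : Int × Int) == ((m : Int), k2)) =
        (PySem.List.pyRange 0 40 1).count ((m : Int)) := by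
      rw [List.count_eq_countP]
      apply List.countP_congr
      intro r _
      simp only [beq_iff_eq, Prod.mk.injEq]
      constructor
      · rintro ⟨h1, -⟩; exact h1
      · rintro rfl; exact ⟨rfl, hc.symm⟩
    rw [hcp, show ((40 : Int)) = ((40 : Nat) : Int) from rfl, PySem.List.pyRange_zero_natCast,
      List.count_map_of_injective _ _ (fun a b h => by exact_mod_cast h), List.count_range]
    simp [hm, hc]
  · have hcp : (PySem.List.pyRange 0 40 1).countP
        (fun r => ((r, col r) : Int × Int) == ((m : Int), k2)) = 0 := by
      apply List.countP_eq_zero.2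
      intro r _
      simp only [beq_iff_eq, Prod.mk.injEq, not_and]
      rintro rfl h
      exact hc h.symm
    rw [hcp]
    simp [hc]

-- summing key-counts over the 40 residues counts the matching pairs
lemma sum_count_pairs (col : Int → Int) (keys : List (Int × Int))
    (hk : ∀ k ∈ keys, 0 ≤ k.1 ∧ k.1 < 40) :
    ((PySem.List.pyRange 0 40 1).map (fun r => (keys.count (r, col r) : Int))).sum =
      (keys.countP (fun k => k.2 == col k.1) : Int) := by
  induction keys with
  | nil => simp
  | cons k t ih =>
    obtain ⟨k1, k2⟩ := k
    have hk1 := hk (k1, k2) (List.mem_cons_self ..)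
    have ht : ∀ x ∈ t, 0 ≤ x.1 ∧ x.1 < 40 := fun x hx => hk x (List.mem_cons_of_mem _ hx)
    have hcount : ∀ r : Int, (((k1, k2) :: t).count (r, col r) : Int) =
        (t.count (r, col r) : Int) + (if ((r, col r) : Int × Int) == (k1, k2) then (1 : Int) else 0) := by
      intro r
      rw [List.count_cons]
      push_cast
      by_cases h : ((r, col r) : Int × Int) = (k1, k2)
      · simp [h]
      · have h' : ¬ (((k1, k2) : Int × Int) = (r, col r)) := fun e => h e.symm
        simp [h, h']
    simp only [hcount]
    rw [PySem.List.sum_map_add_int, ih ht,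
      count_one_key col k1 k2 hk1.1 hk1.2, List.countP_cons]
    by_cases h : k2 = col k1 <;> simp [h]

-- every histogram key has its residue in [0, 40)
lemma histKeys_bound (answers : List Int) :
    ∀ k ∈ histKeys answers, 0 ≤ k.1 ∧ k.1 < 40 := by
  intro k hk
  obtain ⟨ia, _, rfl⟩ := List.mem_map.1 hk
  exact ⟨PySem.Int.mod_nonneg _ (by norm_num), PySem.Int.mod_lt _ (by norm_num)⟩

-- the histogram score equals the per-index indicator fold (bStep), for any pattern
-- whose period divides 40 (stated as the mod identity)
lemma cntHist_eq (answers p : List Int)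
    (hmod : ∀ k : Nat, k % 40 % p.length = k % p.length) :
    cntHist (histFreq answers) p =
      (PySem.List.pyRange 0 (answers.length : Int) 1).foldl (bStep answers p) 0 := by
  unfold cntHist histFreq
  rw [PySem.List.foldl_add]
  simp only [PySem.Dict.getD_foldl_insert_add_one, PySem.Dict.getD_empty, zero_add]
  rw [sum_count_pairs _ (histKeys answers) (histKeys_bound answers), bStep_fold_eq_countP]
  have h : (histKeys answers).countP
      (fun k => k.2 == PySem.List.pyGetD p (PySem.Int.mod k.1 (p.length : Int)) 0) =
    (PySem.List.enumerate answers 0).countP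
      (fun ia => ia.2 == PySem.List.pyGetD p (PySem.Int.mod ia.1 (p.length : Int)) 0) := by
    unfold histKeys
    rw [List.countP_map]
    apply List.countP_congr
    intro ia hia
    obtain ⟨j, hj, rfl⟩ := (PySem.List.mem_enumerate_iff _ _ _).1 hia
    simp only [Function.comp_def, zero_add]
    rw [show PySem.Int.mod ((j : Int)) 40 = ((j % 40 : Nat) : Int) from by
        exact_mod_cast PySem.Int.mod_natCast j 40,
      show PySem.Int.mod (((j % 40 : Nat) : Int)) (p.length : Int) = ((j % 40 % p.length : Nat) : Int) from by
        exact_mod_cast PySem.Int.mod_natCast (j % 40) p.length,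
      show PySem.Int.mod ((j : Int)) (p.length : Int) = ((j % p.length : Nat) : Int) from by
        exact_mod_cast PySem.Int.mod_natCast j p.length,
      hmod j]
  exact_mod_cast h

-- ===== VERDICT (by name: the statement is the Claim_ definition above) =====
theorem solution_spec : Claim_equal_solution := by
  intro answers _
  show solution answers = solution_alt answers
  unfold solution solution_alt
  rw [foldl_triple answers _ (fun i hi => ((PySem.List.mem_pyRange_one).1 hi).1) 0 0 0]
  have h1 := cntHist_eq answers pat1 (fun k => by
    simp only [pat1, List.length_cons, List.length_nil]; omega)
  have h2 := cntHist_eq answers pat2 (fun k => by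
    simp only [pat2, List.length_cons, List.length_nil]; omega)
  have h3 := cntHist_eq answers pat3 (fun k => by
    simp only [pat3, List.length_cons, List.length_nil]; omega)
  set c1 := (PySem.List.pyRange 0 (answers.length : Int) 1).foldl (bStep answers pat1) 0 with hc1
  set c2 := (PySem.List.pyRange 0 (answers.length : Int) 1).foldl (bStep answers pat2) 0 with hc2
  set c3 := (PySem.List.pyRange 0 (answers.length : Int) 1).foldl (bStep answers pat3) 0 with hc3
  have hr : PySem.List.pyRange 0 3 1 = [0, 1, 2] := by decide
  simp only [List.length_cons, List.length_nil, List.map_cons, List.map_nil, h1, h2, h3]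
  norm_num [hr, PySem.List.max?_id_cons, PySem.List.pyGetD_ofNat', List.foldl_cons,
    List.foldl_nil, max_assoc]
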